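-- pv_equiv track=rewrite | github.com/aaasocial/F1Dashboard | packages/calibration/src/f1_calibration/compound_map.py | races_for_compound
-- ===== SOURCE A (Python) =====
-- COMPOUND_MAP: dict[tuple[int, int], dict[str, str]] = {
--     # ─── 2022 Season ───────────────────────────────────────────────────────────
--     (2022, 1):  {"SOFT": "C3", "MEDIUM": "C2", "HARD": "C1"},   # Bahrain
--     (2022, 2):  {"SOFT": "C4", "MEDIUM": "C3", "HARD": "C2"},   # Saudi Arabia
--     (2022, 3):  {"SOFT": "C5", "MEDIUM": "C4", "HARD": "C3"},   # Australia
--     (2022, 4):  {"SOFT": "C4", "MEDIUM": "C3", "HARD": "C2"},   # Emilia Romagna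
--     (2022, 5):  {"SOFT": "C4", "MEDIUM": "C3", "HARD": "C2"},   # Miami
--     (2022, 6):  {"SOFT": "C5", "MEDIUM": "C4", "HARD": "C3"},   # Monaco
--     (2022, 7):  {"SOFT": "C5", "MEDIUM": "C4", "HARD": "C3"},   # Azerbaijan
--     (2022, 8):  {"SOFT": "C3", "MEDIUM": "C2", "HARD": "C1"},   # Canada
--     (2022, 9):  {"SOFT": "C4", "MEDIUM": "C3", "HARD": "C2"},   # Great Britain
--     (2022, 10): {"SOFT": "C4", "MEDIUM": "C3", "HARD": "C2"},   # Austria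
--     (2022, 11): {"SOFT": "C4", "MEDIUM": "C3", "HARD": "C2"},   # France
--     (2022, 12): {"SOFT": "C4", "MEDIUM": "C3", "HARD": "C2"},   # Hungary
--     (2022, 13): {"SOFT": "C3", "MEDIUM": "C2", "HARD": "C1"},   # Belgium
--     (2022, 14): {"SOFT": "C5", "MEDIUM": "C4", "HARD": "C3"},   # Netherlands
--     (2022, 15): {"SOFT": "C4", "MEDIUM": "C3", "HARD": "C2"},   # Italy
--     (2022, 16): {"SOFT": "C5", "MEDIUM": "C4", "HARD": "C3"},   # Singapore
--     (2022, 17): {"SOFT": "C4", "MEDIUM": "C3", "HARD": "C2"},   # Japan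
--     (2022, 18): {"SOFT": "C4", "MEDIUM": "C3", "HARD": "C2"},   # United States
--     (2022, 19): {"SOFT": "C4", "MEDIUM": "C3", "HARD": "C2"},   # Mexico
--     (2022, 20): {"SOFT": "C4", "MEDIUM": "C3", "HARD": "C2"},   # Brazil
--     (2022, 21): {"SOFT": "C4", "MEDIUM": "C3", "HARD": "C2"},   # Abu Dhabi
--     (2022, 22): {"SOFT": "C4", "MEDIUM": "C3", "HARD": "C2"},   # placeholder
--
--     # ─── 2023 Season ───────────────────────────────────────────────────────────
--     (2023, 1):  {"SOFT": "C3", "MEDIUM": "C2", "HARD": "C1"},   # Bahrain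
--     (2023, 2):  {"SOFT": "C4", "MEDIUM": "C3", "HARD": "C2"},   # Saudi Arabia
--     (2023, 3):  {"SOFT": "C5", "MEDIUM": "C4", "HARD": "C3"},   # Australia
--     (2023, 4):  {"SOFT": "C4", "MEDIUM": "C3", "HARD": "C2"},   # Azerbaijan
--     (2023, 5):  {"SOFT": "C4", "MEDIUM": "C3", "HARD": "C2"},   # Miami
--     (2023, 6):  {"SOFT": "C5", "MEDIUM": "C4", "HARD": "C3"},   # Monaco — C3/C4/C5 per Pirelli
--     (2023, 7):  {"SOFT": "C3", "MEDIUM": "C2", "HARD": "C1"},   # Spain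
--     (2023, 8):  {"SOFT": "C4", "MEDIUM": "C3", "HARD": "C2"},   # Canada
--     (2023, 9):  {"SOFT": "C4", "MEDIUM": "C3", "HARD": "C2"},   # Austria
--     (2023, 10): {"SOFT": "C4", "MEDIUM": "C3", "HARD": "C2"},   # Great Britain
--     (2023, 11): {"SOFT": "C4", "MEDIUM": "C3", "HARD": "C2"},   # Hungary
--     (2023, 12): {"SOFT": "C3", "MEDIUM": "C2", "HARD": "C1"},   # Belgium
--     (2023, 13): {"SOFT": "C5", "MEDIUM": "C4", "HARD": "C3"},   # Netherlands
--     (2023, 14): {"SOFT": "C4", "MEDIUM": "C3", "HARD": "C2"},   # Italy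
--     (2023, 15): {"SOFT": "C5", "MEDIUM": "C4", "HARD": "C3"},   # Singapore
--     (2023, 16): {"SOFT": "C4", "MEDIUM": "C3", "HARD": "C2"},   # Japan
--     (2023, 17): {"SOFT": "C3", "MEDIUM": "C2", "HARD": "C1"},   # Qatar
--     (2023, 18): {"SOFT": "C4", "MEDIUM": "C3", "HARD": "C2"},   # United States
--     (2023, 19): {"SOFT": "C4", "MEDIUM": "C3", "HARD": "C2"},   # Mexico
--     (2023, 20): {"SOFT": "C4", "MEDIUM": "C3", "HARD": "C2"},   # Brazil
--     (2023, 21): {"SOFT": "C4", "MEDIUM": "C3", "HARD": "C2"},   # Las Vegas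
--     (2023, 22): {"SOFT": "C3", "MEDIUM": "C2", "HARD": "C1"},   # Abu Dhabi
--
--     # ─── 2024 Season ───────────────────────────────────────────────────────────
--     (2024, 1):  {"SOFT": "C3", "MEDIUM": "C2", "HARD": "C1"},   # Bahrain
--     (2024, 2):  {"SOFT": "C4", "MEDIUM": "C3", "HARD": "C2"},   # Saudi Arabia
--     (2024, 3):  {"SOFT": "C5", "MEDIUM": "C4", "HARD": "C3"},   # Australia
--     (2024, 4):  {"SOFT": "C4", "MEDIUM": "C3", "HARD": "C2"},   # Japan
--     (2024, 5):  {"SOFT": "C4", "MEDIUM": "C3", "HARD": "C2"},   # China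
--     (2024, 6):  {"SOFT": "C4", "MEDIUM": "C3", "HARD": "C2"},   # Miami
--     (2024, 7):  {"SOFT": "C4", "MEDIUM": "C3", "HARD": "C2"},   # Emilia Romagna
--     (2024, 8):  {"SOFT": "C5", "MEDIUM": "C4", "HARD": "C3"},   # Monaco
--     (2024, 9):  {"SOFT": "C4", "MEDIUM": "C3", "HARD": "C2"},   # Canada
--     (2024, 10): {"SOFT": "C3", "MEDIUM": "C2", "HARD": "C1"},   # Spain
--     (2024, 11): {"SOFT": "C4", "MEDIUM": "C3", "HARD": "C2"},   # Austria
--     (2024, 12): {"SOFT": "C4", "MEDIUM": "C3", "HARD": "C2"},   # Great Britain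
--     (2024, 13): {"SOFT": "C4", "MEDIUM": "C3", "HARD": "C2"},   # Hungary
--     (2024, 14): {"SOFT": "C3", "MEDIUM": "C2", "HARD": "C1"},   # Belgium
--     (2024, 15): {"SOFT": "C5", "MEDIUM": "C4", "HARD": "C3"},   # Netherlands
--     (2024, 16): {"SOFT": "C4", "MEDIUM": "C3", "HARD": "C2"},   # Italy
--     (2024, 17): {"SOFT": "C5", "MEDIUM": "C4", "HARD": "C3"},   # Azerbaijan
--     (2024, 18): {"SOFT": "C5", "MEDIUM": "C4", "HARD": "C3"},   # Singapore
--     (2024, 19): {"SOFT": "C4", "MEDIUM": "C3", "HARD": "C2"},   # United States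
--     (2024, 20): {"SOFT": "C4", "MEDIUM": "C3", "HARD": "C2"},   # Mexico
--     (2024, 21): {"SOFT": "C3", "MEDIUM": "C2", "HARD": "C1"},   # Brazil
--     (2024, 22): {"SOFT": "C4", "MEDIUM": "C3", "HARD": "C2"},   # Las Vegas
--     (2024, 23): {"SOFT": "C5", "MEDIUM": "C4", "HARD": "C3"},   # Qatar
--     (2024, 24): {"SOFT": "C3", "MEDIUM": "C2", "HARD": "C1"},   # Abu Dhabi
-- }
--
-- def races_for_compound(target: str, years: tuple[int, ...]) -> list[tuple[int, int]]:
--     """Return (year, round_num) pairs where `target` (e.g. 'C3') was assigned as any FIA compound.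
--
--     Args:
--         target: Pirelli compound code, e.g. 'C3'. Must be one of C1..C5.
--         years: Tuple of season years to search within.
--
--     Returns:
--         Sorted list of (year, round_num) tuples.
--
--     Raises:
--         ValueError: If target is not a valid Cx code.
--     """
--     if target not in {"C1", "C2", "C3", "C4", "C5"}:
--         raise ValueError(f"target must be C1..C5, got {target!r}")
--     out: list[tuple[int, int]] = []
--     for (yr, rnd), mapping in COMPOUND_MAP.items():
--         if yr not in years:
--             continue
--         if target in mapping.values():
--             out.append((yr, rnd))
--     return sorted(out)
-- ===== SOURCE B (Python) =====
-- # Each season is encoded as a digit string: digit t at position r-1 means round r of that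
-- # year used the compound trio C{t}, C{t+1}, C{t+2} (t = 1, 2 or 3).  A compound Cn was
-- # assigned at a race exactly when t <= n <= t + 2.
-- TIER_STRINGS: dict[int, str] = {
--     2022: "1232233122221323222222",
--     2023: "1232231222213232122221",
--     2024: "123222232122213233221231",
-- }
--
--
-- def races_for_compound(target: str, years: tuple[int, ...]) -> list[tuple[int, int]]:
--     """Return sorted (year, round_num) pairs where `target` was assigned as any FIA compound."""
--     if target not in {"C1", "C2", "C3", "C4", "C5"}:
--         raise ValueError(f"target must be C1..C5, got {target!r}")
--     n = int(target[1])
--     out: list[tuple[int, int]] = []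
--     for yr, tiers in TIER_STRINGS.items():
--         if yr not in years:
--             continue
--         for i, ch in enumerate(tiers):
--             t = int(ch)
--             if t <= n <= t + 2:
--                 out.append((yr, i + 1))
--     return out
-- ===== Notes on version B (the rewrite author's own statement) =====
-- stated objective: alternative
-- what changed: B replaces the per-call scan of COMPOUND_MAP (dict-values membership test per race, then a final sort) with a compact per-season tier table (one digit per round encoding the race's compound trio) that is walked year by year with an arithmetic range test t <= n <= t+2, emitting the pairs already in sorted order so no sort is needed.
import Mathlib
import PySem

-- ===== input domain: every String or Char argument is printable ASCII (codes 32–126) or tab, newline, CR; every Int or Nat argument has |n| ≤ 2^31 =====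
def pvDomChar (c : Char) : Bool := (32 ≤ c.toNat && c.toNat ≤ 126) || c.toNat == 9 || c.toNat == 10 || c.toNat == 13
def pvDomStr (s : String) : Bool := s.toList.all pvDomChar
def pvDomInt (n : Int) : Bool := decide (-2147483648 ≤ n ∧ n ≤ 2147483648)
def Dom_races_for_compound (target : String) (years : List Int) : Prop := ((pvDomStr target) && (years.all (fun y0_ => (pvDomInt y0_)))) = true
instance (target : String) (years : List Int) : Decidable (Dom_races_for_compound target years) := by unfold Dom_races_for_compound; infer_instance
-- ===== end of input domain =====

-- B replaces A's per-call scan of COMPOUND_MAP (dict-values membership per race, then a sort)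
-- with a compact per-season tier-digit table walked with an arithmetic range test, emitting the
-- pairs already in sorted order; objective: alternative. Return-value equivalence only.

-- ===== PORT A =====
-- The module-level constant COMPOUND_MAP, in insertion order.
def compoundMap : List ((Int × Int) × PySem.Dict String String) := [
  (((2022 : Int), (1 : Int)), PySem.Dict.ofList [("SOFT", "C3"), ("MEDIUM", "C2"), ("HARD", "C1")]),
  (((2022 : Int), (2 : Int)), PySem.Dict.ofList [("SOFT", "C4"), ("MEDIUM", "C3"), ("HARD", "C2")]),
  (((2022 : Int), (3 : Int)), PySem.Dict.ofList [("SOFT", "C5"), ("MEDIUM", "C4"), ("HARD", "C3")]),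
  (((2022 : Int), (4 : Int)), PySem.Dict.ofList [("SOFT", "C4"), ("MEDIUM", "C3"), ("HARD", "C2")]),
  (((2022 : Int), (5 : Int)), PySem.Dict.ofList [("SOFT", "C4"), ("MEDIUM", "C3"), ("HARD", "C2")]),
  (((2022 : Int), (6 : Int)), PySem.Dict.ofList [("SOFT", "C5"), ("MEDIUM", "C4"), ("HARD", "C3")]),
  (((2022 : Int), (7 : Int)), PySem.Dict.ofList [("SOFT", "C5"), ("MEDIUM", "C4"), ("HARD", "C3")]),
  (((2022 : Int), (8 : Int)), PySem.Dict.ofList [("SOFT", "C3"), ("MEDIUM", "C2"), ("HARD", "C1")]),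
  (((2022 : Int), (9 : Int)), PySem.Dict.ofList [("SOFT", "C4"), ("MEDIUM", "C3"), ("HARD", "C2")]),
  (((2022 : Int), (10 : Int)), PySem.Dict.ofList [("SOFT", "C4"), ("MEDIUM", "C3"), ("HARD", "C2")]),
  (((2022 : Int), (11 : Int)), PySem.Dict.ofList [("SOFT", "C4"), ("MEDIUM", "C3"), ("HARD", "C2")]),
  (((2022 : Int), (12 : Int)), PySem.Dict.ofList [("SOFT", "C4"), ("MEDIUM", "C3"), ("HARD", "C2")]),
  (((2022 : Int), (13 : Int)), PySem.Dict.ofList [("SOFT", "C3"), ("MEDIUM", "C2"), ("HARD", "C1")]),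
  (((2022 : Int), (14 : Int)), PySem.Dict.ofList [("SOFT", "C5"), ("MEDIUM", "C4"), ("HARD", "C3")]),
  (((2022 : Int), (15 : Int)), PySem.Dict.ofList [("SOFT", "C4"), ("MEDIUM", "C3"), ("HARD", "C2")]),
  (((2022 : Int), (16 : Int)), PySem.Dict.ofList [("SOFT", "C5"), ("MEDIUM", "C4"), ("HARD", "C3")]),
  (((2022 : Int), (17 : Int)), PySem.Dict.ofList [("SOFT", "C4"), ("MEDIUM", "C3"), ("HARD", "C2")]),
  (((2022 : Int), (18 : Int)), PySem.Dict.ofList [("SOFT", "C4"), ("MEDIUM", "C3"), ("HARD", "C2")]),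
  (((2022 : Int), (19 : Int)), PySem.Dict.ofList [("SOFT", "C4"), ("MEDIUM", "C3"), ("HARD", "C2")]),
  (((2022 : Int), (20 : Int)), PySem.Dict.ofList [("SOFT", "C4"), ("MEDIUM", "C3"), ("HARD", "C2")]),
  (((2022 : Int), (21 : Int)), PySem.Dict.ofList [("SOFT", "C4"), ("MEDIUM", "C3"), ("HARD", "C2")]),
  (((2022 : Int), (22 : Int)), PySem.Dict.ofList [("SOFT", "C4"), ("MEDIUM", "C3"), ("HARD", "C2")]),
  (((2023 : Int), (1 : Int)), PySem.Dict.ofList [("SOFT", "C3"), ("MEDIUM", "C2"), ("HARD", "C1")]),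
  (((2023 : Int), (2 : Int)), PySem.Dict.ofList [("SOFT", "C4"), ("MEDIUM", "C3"), ("HARD", "C2")]),
  (((2023 : Int), (3 : Int)), PySem.Dict.ofList [("SOFT", "C5"), ("MEDIUM", "C4"), ("HARD", "C3")]),
  (((2023 : Int), (4 : Int)), PySem.Dict.ofList [("SOFT", "C4"), ("MEDIUM", "C3"), ("HARD", "C2")]),
  (((2023 : Int), (5 : Int)), PySem.Dict.ofList [("SOFT", "C4"), ("MEDIUM", "C3"), ("HARD", "C2")]),
  (((2023 : Int), (6 : Int)), PySem.Dict.ofList [("SOFT", "C5"), ("MEDIUM", "C4"), ("HARD", "C3")]),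
  (((2023 : Int), (7 : Int)), PySem.Dict.ofList [("SOFT", "C3"), ("MEDIUM", "C2"), ("HARD", "C1")]),
  (((2023 : Int), (8 : Int)), PySem.Dict.ofList [("SOFT", "C4"), ("MEDIUM", "C3"), ("HARD", "C2")]),
  (((2023 : Int), (9 : Int)), PySem.Dict.ofList [("SOFT", "C4"), ("MEDIUM", "C3"), ("HARD", "C2")]),
  (((2023 : Int), (10 : Int)), PySem.Dict.ofList [("SOFT", "C4"), ("MEDIUM", "C3"), ("HARD", "C2")]),
  (((2023 : Int), (11 : Int)), PySem.Dict.ofList [("SOFT", "C4"), ("MEDIUM", "C3"), ("HARD", "C2")]),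
  (((2023 : Int), (12 : Int)), PySem.Dict.ofList [("SOFT", "C3"), ("MEDIUM", "C2"), ("HARD", "C1")]),
  (((2023 : Int), (13 : Int)), PySem.Dict.ofList [("SOFT", "C5"), ("MEDIUM", "C4"), ("HARD", "C3")]),
  (((2023 : Int), (14 : Int)), PySem.Dict.ofList [("SOFT", "C4"), ("MEDIUM", "C3"), ("HARD", "C2")]),
  (((2023 : Int), (15 : Int)), PySem.Dict.ofList [("SOFT", "C5"), ("MEDIUM", "C4"), ("HARD", "C3")]),
  (((2023 : Int), (16 : Int)), PySem.Dict.ofList [("SOFT", "C4"), ("MEDIUM", "C3"), ("HARD", "C2")]),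
  (((2023 : Int), (17 : Int)), PySem.Dict.ofList [("SOFT", "C3"), ("MEDIUM", "C2"), ("HARD", "C1")]),
  (((2023 : Int), (18 : Int)), PySem.Dict.ofList [("SOFT", "C4"), ("MEDIUM", "C3"), ("HARD", "C2")]),
  (((2023 : Int), (19 : Int)), PySem.Dict.ofList [("SOFT", "C4"), ("MEDIUM", "C3"), ("HARD", "C2")]),
  (((2023 : Int), (20 : Int)), PySem.Dict.ofList [("SOFT", "C4"), ("MEDIUM", "C3"), ("HARD", "C2")]),
  (((2023 : Int), (21 : Int)), PySem.Dict.ofList [("SOFT", "C4"), ("MEDIUM", "C3"), ("HARD", "C2")]),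
  (((2023 : Int), (22 : Int)), PySem.Dict.ofList [("SOFT", "C3"), ("MEDIUM", "C2"), ("HARD", "C1")]),
  (((2024 : Int), (1 : Int)), PySem.Dict.ofList [("SOFT", "C3"), ("MEDIUM", "C2"), ("HARD", "C1")]),
  (((2024 : Int), (2 : Int)), PySem.Dict.ofList [("SOFT", "C4"), ("MEDIUM", "C3"), ("HARD", "C2")]),
  (((2024 : Int), (3 : Int)), PySem.Dict.ofList [("SOFT", "C5"), ("MEDIUM", "C4"), ("HARD", "C3")]),
  (((2024 : Int), (4 : Int)), PySem.Dict.ofList [("SOFT", "C4"), ("MEDIUM", "C3"), ("HARD", "C2")]),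
  (((2024 : Int), (5 : Int)), PySem.Dict.ofList [("SOFT", "C4"), ("MEDIUM", "C3"), ("HARD", "C2")]),
  (((2024 : Int), (6 : Int)), PySem.Dict.ofList [("SOFT", "C4"), ("MEDIUM", "C3"), ("HARD", "C2")]),
  (((2024 : Int), (7 : Int)), PySem.Dict.ofList [("SOFT", "C4"), ("MEDIUM", "C3"), ("HARD", "C2")]),
  (((2024 : Int), (8 : Int)), PySem.Dict.ofList [("SOFT", "C5"), ("MEDIUM", "C4"), ("HARD", "C3")]),
  (((2024 : Int), (9 : Int)), PySem.Dict.ofList [("SOFT", "C4"), ("MEDIUM", "C3"), ("HARD", "C2")]),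
  (((2024 : Int), (10 : Int)), PySem.Dict.ofList [("SOFT", "C3"), ("MEDIUM", "C2"), ("HARD", "C1")]),
  (((2024 : Int), (11 : Int)), PySem.Dict.ofList [("SOFT", "C4"), ("MEDIUM", "C3"), ("HARD", "C2")]),
  (((2024 : Int), (12 : Int)), PySem.Dict.ofList [("SOFT", "C4"), ("MEDIUM", "C3"), ("HARD", "C2")]),
  (((2024 : Int), (13 : Int)), PySem.Dict.ofList [("SOFT", "C4"), ("MEDIUM", "C3"), ("HARD", "C2")]),
  (((2024 : Int), (14 : Int)), PySem.Dict.ofList [("SOFT", "C3"), ("MEDIUM", "C2"), ("HARD", "C1")]),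
  (((2024 : Int), (15 : Int)), PySem.Dict.ofList [("SOFT", "C5"), ("MEDIUM", "C4"), ("HARD", "C3")]),
  (((2024 : Int), (16 : Int)), PySem.Dict.ofList [("SOFT", "C4"), ("MEDIUM", "C3"), ("HARD", "C2")]),
  (((2024 : Int), (17 : Int)), PySem.Dict.ofList [("SOFT", "C5"), ("MEDIUM", "C4"), ("HARD", "C3")]),
  (((2024 : Int), (18 : Int)), PySem.Dict.ofList [("SOFT", "C5"), ("MEDIUM", "C4"), ("HARD", "C3")]),
  (((2024 : Int), (19 : Int)), PySem.Dict.ofList [("SOFT", "C4"), ("MEDIUM", "C3"), ("HARD", "C2")]),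
  (((2024 : Int), (20 : Int)), PySem.Dict.ofList [("SOFT", "C4"), ("MEDIUM", "C3"), ("HARD", "C2")]),
  (((2024 : Int), (21 : Int)), PySem.Dict.ofList [("SOFT", "C3"), ("MEDIUM", "C2"), ("HARD", "C1")]),
  (((2024 : Int), (22 : Int)), PySem.Dict.ofList [("SOFT", "C4"), ("MEDIUM", "C3"), ("HARD", "C2")]),
  (((2024 : Int), (23 : Int)), PySem.Dict.ofList [("SOFT", "C5"), ("MEDIUM", "C4"), ("HARD", "C3")]),
  (((2024 : Int), (24 : Int)), PySem.Dict.ofList [("SOFT", "C3"), ("MEDIUM", "C2"), ("HARD", "C1")])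
]

def races_for_compound (target : String) (years : List Int) : List (Int × Int) :=
  -- the ValueError guard (target not in {"C1",..,"C5"}) is excluded by Pre_
  let out := compoundMap.foldl (fun out e =>
    if e.1.1 ∈ years then
      (if target ∈ e.2.values then out ++ [e.1] else out)
    else out) []
  PySem.List.sorted2 out (fun p => p.1) (fun p => p.2)

-- ===== PORT B =====
-- TIER_STRINGS: one digit per round; digit t means the race used the trio C{t},C{t+1},C{t+2}
def tierTable : List (Int × String) := [
  ((2022 : Int), "1232233122221323222222"),
  ((2023 : Int), "1232231222213232122221"),
  ((2024 : Int), "123222232122213233221231")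
]

-- n = int(target[1])
def nOf (target : String) : Int :=
  match PySem.Str.pyGet? target 1 with
  | some c => (PySem.Int.ofChars? [c]).getD 0
  | none => 0

def races_for_compound_alt (target : String) (years : List Int) : List (Int × Int) :=
  if target ∈ ["C1", "C2", "C3", "C4", "C5"] then
    let n := nOf target
    tierTable.foldl (fun out e =>
      if e.1 ∈ years then
        (PySem.List.enumerate e.2.toList).foldl (fun out it =>
          if (PySem.Int.ofChars? [it.2]).getD 0 ≤ n ∧
             n ≤ (PySem.Int.ofChars? [it.2]).getD 0 + 2 then
            out ++ [(e.1, it.1 + 1)]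
          else out) out
      else out) []
  else []  -- the ValueError guard, excluded by Pre_

-- ===== PRECONDITION & SPEC =====
-- Pre_ excludes exactly the targets outside C1..C5, on which A raises ValueError.
def Pre_races_for_compound (target : String) (years : List Int) : Prop :=
  target ∈ ["C1", "C2", "C3", "C4", "C5"]
instance (target : String) (years : List Int) : Decidable (Pre_races_for_compound target years) := by unfold Pre_races_for_compound; infer_instance
def pvWitness_races_for_compound : String × List Int := ("C3", [2023, 2024])

def Spec_races_for_compound (target : String) (years : List Int) (out : List (Int × Int)) : Prop := out = races_for_compound_alt target years
instance (target : String) (years : List Int) (out : List (Int × Int)) : Decidable (Spec_races_for_compound target years out) := by unfold Spec_races_for_compound; infer_instance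

-- ===== CLAIM (what is proved, stated in full; the proofs are below) =====
def Claim_equal_races_for_compound : Prop := ∀ (target : String) (years : List Int), Dom_races_for_compound target years → Pre_races_for_compound target years → Spec_races_for_compound target years (races_for_compound target years)

-- ===== LEMMAS AND PROOFS =====

-- B's inner loop over one season's digit string, as filter-then-map.
def roundsFor (n : Int) (e : Int × String) : List (Int × Int) :=
  ((PySem.List.enumerate e.2.toList).filter (fun it =>
    decide ((PySem.Int.ofChars? [it.2]).getD 0 ≤ n ∧
            n ≤ (PySem.Int.ofChars? [it.2]).getD 0 + 2))).map (fun it => (e.1, it.1 + 1))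

theorem inner_loop (n yr : Int) (L : List (Int × Char)) (acc : List (Int × Int)) :
    L.foldl (fun out it =>
      if (PySem.Int.ofChars? [it.2]).getD 0 ≤ n ∧
         n ≤ (PySem.Int.ofChars? [it.2]).getD 0 + 2 then
        out ++ [(yr, it.1 + 1)]
      else out) acc
    = acc ++ (L.filter (fun it =>
        decide ((PySem.Int.ofChars? [it.2]).getD 0 ≤ n ∧
                n ≤ (PySem.Int.ofChars? [it.2]).getD 0 + 2))).map (fun it => (yr, it.1 + 1)) := by
  induction L generalizing acc with
  | nil => simp
  | cons it L ih =>
    simp only [List.foldl_cons, List.filter_cons, ih]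
    by_cases h : (PySem.Int.ofChars? [it.2]).getD 0 ≤ n ∧
        n ≤ (PySem.Int.ofChars? [it.2]).getD 0 + 2 <;> simp [h]

-- A's collecting loop collects the keys of matching entries, filtered by year.
theorem collect_eq_filter (target : String) (years : List Int)
    (L : List ((Int × Int) × PySem.Dict String String)) (acc : List (Int × Int)) :
    L.foldl (fun out e =>
      if e.1.1 ∈ years then
        (if target ∈ e.2.values then out ++ [e.1] else out)
      else out) acc
    = acc ++ ((L.filter (fun e => target ∈ e.2.values)).map (fun e => e.1)).filter
        (fun p => p.1 ∈ years) := by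
  induction L generalizing acc with
  | nil => simp
  | cons e L ih =>
    simp only [List.foldl_cons, List.filter_cons, ih]
    by_cases hy : e.1.1 ∈ years <;> by_cases ht : target ∈ e.2.values <;>
      simp [hy, ht]

-- An insertion sort leaves a list alone when every new element belongs at the end.
theorem foldl_insertBy_eq_append {α : Type} (before : α → α → Bool) :
    ∀ (M acc : List α), (∀ x ∈ M, ∀ y ∈ acc, before x y = false) →
      M.Pairwise (fun a b => before b a = false) →
      M.foldl (fun acc x => PySem.List.insertBy before x acc) acc = acc ++ M := by
  intro M
  induction M with
  | nil => intro acc _ _; simp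
  | cons x t ih =>
    intro acc h hp
    obtain ⟨hx, hp'⟩ := List.pairwise_cons.mp hp
    simp only [List.foldl_cons]
    rw [PySem.List.insertBy_of_forall_not_before before x acc
      (fun y hy => h x (List.mem_cons_self ..) y hy)]
    rw [ih (acc ++ [x])
      (fun z hz y hy => by
        rcases List.mem_append.mp hy with hy | hy
        · exact h z (List.mem_cons_of_mem _ hz) y hy
        · rcases List.mem_singleton.mp hy with rfl
          exact hx z hz) hp']
    simp

-- sorted2 with the (fst, snd) key is the identity on a lexicographically increasing list.
theorem sorted2_pairs_eq_self (L : List (Int × Int))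
    (h : L.Pairwise (fun a b => a.1 < b.1 ∨ (a.1 = b.1 ∧ a.2 < b.2))) :
    PySem.List.sorted2 L (fun p => p.1) (fun p => p.2) = L := by
  have h' : L.Pairwise (fun a b =>
      (decide (b.1 < a.1) || (!decide (a.1 < b.1) && decide (b.2 < a.2))) = false) := by
    refine h.imp ?_
    intro a b hab
    rcases hab with hlt | ⟨heq, hlt⟩ <;>
      simp_all [decide_eq_false_iff_not] <;> omega
  simpa [PySem.List.sorted2] using
    foldl_insertBy_eq_append _ L [] (by simp) h'

-- Filtering a year-tagged flatMap by year membership selects whole blocks.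
theorem filter_flatMap_const (ys : List (Int × String)) (f : Int × String → List (Int × Int))
    (hf : ∀ e p, p ∈ f e → p.1 = e.1) (years : List Int) :
    (ys.flatMap f).filter (fun p => p.1 ∈ years)
      = ys.flatMap (fun e => if e.1 ∈ years then f e else []) := by
  induction ys with
  | nil => simp
  | cons e ys ih =>
    simp only [List.flatMap_cons, List.filter_append, ih]
    congr 1
    by_cases hy : e.1 ∈ years
    · simp only [if_pos hy]
      exact List.filter_eq_self.mpr (fun p hp => by simp [hf e p hp, hy])
    · simp only [if_neg hy]
      exact List.filter_eq_nil_iff.mpr (fun p hp => by simp [hf e p hp, hy])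

theorem key (target : String) (n : Int)
    (hmem : target ∈ ["C1", "C2", "C3", "C4", "C5"])
    (hn : nOf target = n)
    (hM : (compoundMap.filter (fun e => target ∈ e.2.values)).map (fun e => e.1)
        = tierTable.flatMap (roundsFor n))
    (hpw : ((compoundMap.filter (fun e => target ∈ e.2.values)).map (fun e => e.1)).Pairwise
        (fun a b => a.1 < b.1 ∨ (a.1 = b.1 ∧ a.2 < b.2)))
    (years : List Int) :
    races_for_compound target years = races_for_compound_alt target years := by
  have hroundsFst : ∀ (e : Int × String) p, p ∈ roundsFor n e → p.1 = e.1 := by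
    intro e p hp
    simp only [roundsFor, List.mem_map] at hp
    obtain ⟨it, _, rfl⟩ := hp
    rfl
  unfold races_for_compound races_for_compound_alt
  rw [if_pos hmem]
  simp only [hn, collect_eq_filter, List.nil_append]
  rw [sorted2_pairs_eq_self _ (List.Pairwise.sublist List.filter_sublist hpw)]
  rw [hM, filter_flatMap_const _ _ hroundsFst]
  rw [PySem.List.foldl_congr_mem' tierTable
    (fun out e =>
      if e.1 ∈ years then
        (PySem.List.enumerate e.2.toList).foldl (fun out it =>
          if (PySem.Int.ofChars? [it.2]).getD 0 ≤ n ∧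
             n ≤ (PySem.Int.ofChars? [it.2]).getD 0 + 2 then
            out ++ [(e.1, it.1 + 1)]
          else out) out
      else out)
    (fun out e => out ++ (if e.1 ∈ years then roundsFor n e else [])) []
    (by
      intro e _ out
      by_cases hy : e.1 ∈ years
      · simp only [if_pos hy, inner_loop]; rfl
      · simp [hy])]
  rw [PySem.List.foldl_append_eq_flatMap]
  simp

-- ===== VERDICT (by name: the statement is the Claim_ definition above) =====
set_option maxRecDepth 100000 in
theorem races_for_compound_spec : Claim_equal_races_for_compound := by
  intro target years _ hpre
  unfold Spec_races_for_compound
  have h : target ∈ ["C1", "C2", "C3", "C4", "C5"] := hpre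
  fin_cases h
  · exact key "C1" 1 (by decide) (by decide) (by decide) (by decide) years
  · exact key "C2" 2 (by decide) (by decide) (by decide) (by decide) years
  · exact key "C3" 3 (by decide) (by decide) (by decide) (by decide) years
  · exact key "C4" 4 (by decide) (by decide) (by decide) (by decide) years
  · exact key "C5" 5 (by decide) (by decide) (by decide) (by decide) years
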